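-- pv_equiv track=rewrite | github.com/Carl-Kone/Canopy-Internship-Work-Overview | Python Scripts/pdfParser.py | getNameAndAddress
-- ===== SOURCE A (Python) =====
-- def getNameAndAddress(page_content_lines):
--     data = {'region': '', 'address': '', 'name': ''}
--     regions = ['UK', 'Ireland', 'Germany', 'Netherlands', 'Belgium', 'France', 'Spain', 'Italy', 'Poland']
--     for i in range(len(page_content_lines)):
--         for region in regions:
--             if page_content_lines[i].endswith(', ' + region):
--                 data['region'] = region
--                 data['address'] = page_content_lines[i]
--                 data['name'] = page_content_lines[i - 1]
--                 break
--     return data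
-- ===== SOURCE B (Python) =====
-- def getNameAndAddress(page_content_lines):
--     regions = ['UK', 'Ireland', 'Germany', 'Netherlands', 'Belgium', 'France', 'Spain', 'Italy', 'Poland']
--     for i in range(len(page_content_lines) - 1, -1, -1):
--         line = page_content_lines[i]
--         for region in regions:
--             if line.endswith(', ' + region):
--                 return {'region': region, 'address': line,
--                         'name': page_content_lines[i - 1]}
--     return {'region': '', 'address': '', 'name': ''}
-- ===== Notes on version B (the rewrite author's own statement) =====
-- stated objective: simpler
-- what changed: Replaces the forward loop that overwrites the dict on every matching line with a reverse scan that returns immediately at the first (i.e. last-in-order) matching line.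
import Mathlib
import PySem

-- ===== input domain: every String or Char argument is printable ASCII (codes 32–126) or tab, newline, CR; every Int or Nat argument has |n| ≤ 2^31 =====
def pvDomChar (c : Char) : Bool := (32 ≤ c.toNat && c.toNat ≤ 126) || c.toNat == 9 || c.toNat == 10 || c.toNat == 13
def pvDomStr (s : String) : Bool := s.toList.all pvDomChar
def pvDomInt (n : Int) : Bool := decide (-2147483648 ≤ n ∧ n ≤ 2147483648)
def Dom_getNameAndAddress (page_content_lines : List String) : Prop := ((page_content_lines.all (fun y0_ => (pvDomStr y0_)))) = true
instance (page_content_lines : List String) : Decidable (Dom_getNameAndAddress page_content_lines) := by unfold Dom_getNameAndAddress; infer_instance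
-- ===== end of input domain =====

-- B replaces A's forward loop (which overwrites the dict at every matching line) by a reverse
-- scan that returns at the first hit; same return value, no speed claim, return value only.

-- ===== PORT A =====
-- the `regions` list literal of A
def pvRegions : List String :=
  ["UK", "Ireland", "Germany", "Netherlands", "Belgium", "France", "Spain", "Italy", "Poland"]

-- the inner `for region in regions: if …: … break` of A: first region the line ends with
def pvFindRegion (line : String) : Option String :=
  pvRegions.find? (fun region => PySem.Str.endswith line (", " ++ region))

def getNameAndAddress (page_content_lines : List String) : List (String × String) :=
  let data0 : PySem.Dict String String :=
    PySem.Dict.ofList [("region", ""), ("address", ""), ("name", "")]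
  let data := (PySem.List.pyRange 0 (page_content_lines.length : Int) 1).foldl
    (fun d i =>
      let line := PySem.List.pyGetD page_content_lines i ""
      match pvFindRegion line with
      | some region =>
          ((d.insert "region" region).insert "address" line).insert "name"
            (PySem.List.pyGetD page_content_lines (i - 1) "")
      | none => d)
    data0
  data.items

-- ===== PORT B =====
-- B's reverse loop: `pvAltGo ls (i+1)` examines index i; on a hit it returns at once,
-- otherwise continues downward; `pvAltGo ls 0` is the no-match default dict.
def pvAltGo (page_content_lines : List String) : Nat → List (String × String)
  | 0 => [("region", ""), ("address", ""), ("name", "")]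
  | i + 1 =>
    let line := PySem.List.pyGetD page_content_lines (i : Int) ""
    match pvRegions.find? (fun region => PySem.Str.endswith line (", " ++ region)) with
    | some region =>
        [("region", region), ("address", line),
         ("name", PySem.List.pyGetD page_content_lines ((i : Int) - 1) "")]
    | none => pvAltGo page_content_lines i

def getNameAndAddress_alt (page_content_lines : List String) : List (String × String) :=
  pvAltGo page_content_lines page_content_lines.length

-- ===== PRECONDITION & SPEC =====
def Spec_getNameAndAddress (page_content_lines : List String) (out : List (String × String)) : Prop := out = getNameAndAddress_alt page_content_lines
instance (page_content_lines : List String) (out : List (String × String)) : Decidable (Spec_getNameAndAddress page_content_lines out) := by unfold Spec_getNameAndAddress; infer_instance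

-- ===== CLAIM (what is proved, stated in full; the proofs are below) =====
def Claim_equal_getNameAndAddress : Prop := ∀ (page_content_lines : List String), Dom_getNameAndAddress page_content_lines → Spec_getNameAndAddress page_content_lines (getNameAndAddress page_content_lines)

-- ===== LEMMAS AND PROOFS =====

-- `pvAltGo` always produces a three-entry list with these keys
theorem pvAltGo_shape (ls : List String) (n : Nat) :
    ∃ a b c, pvAltGo ls n = [("region", a), ("address", b), ("name", c)] := by
  induction n with
  | zero => exact ⟨"", "", "", rfl⟩
  | succ i ih =>
    simp only [pvAltGo]
    cases h : pvRegions.find? (fun region =>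
        PySem.Str.endswith (PySem.List.pyGetD ls (i : Int) "") (", " ++ region)) with
    | some region => exact ⟨region, _, _, rfl⟩
    | none => exact ih

-- one overwrite pass of A's loop body on a three-key dict
theorem insert3_eq (a b c r l p : String) :
    (((PySem.Dict.ofList [("region", a), ("address", b), ("name", c)]).insert "region" r).insert
        "address" l).insert "name" p
      = PySem.Dict.ofList [("region", r), ("address", l), ("name", p)] := by
  simp [PySem.Dict.ofList, PySem.Dict.update, PySem.Dict.insert, PySem.Dict.contains,
    PySem.Dict.empty]

-- A's fold over range(n) equals B's downward recursion at n, as dicts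
theorem fold_eq_altGo (ls : List String) (n : Nat) :
    (PySem.List.pyRange 0 (n : Int) 1).foldl
      (fun d i =>
        let line := PySem.List.pyGetD ls i ""
        match pvFindRegion line with
        | some region =>
            ((d.insert "region" region).insert "address" line).insert "name"
              (PySem.List.pyGetD ls (i - 1) "")
        | none => d)
      (PySem.Dict.ofList [("region", ""), ("address", ""), ("name", "")])
      = PySem.Dict.ofList (pvAltGo ls n) := by
  induction n with
  | zero => simp [PySem.List.pyRange_one_eq_nil, pvAltGo]
  | succ i ih =>
    have hsplit : PySem.List.pyRange 0 ((i : Int) + 1) 1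
        = PySem.List.pyRange 0 (i : Int) 1 ++ [(i : Int)] :=
      PySem.List.pyRange_one_succ_right (by exact_mod_cast Int.natCast_nonneg i)
    push_cast
    rw [hsplit, List.foldl_append, ih]
    obtain ⟨a, b, c, hshape⟩ := pvAltGo_shape ls i
    simp only [List.foldl_cons, List.foldl_nil, pvAltGo, pvFindRegion]
    cases h : pvRegions.find? (fun region =>
        PySem.Str.endswith (PySem.List.pyGetD ls (i : Int) "") (", " ++ region)) with
    | some region => simp [hshape, insert3_eq]
    | none => simp [hshape]

-- items of ofList of a three-entry list with distinct keys
theorem items_ofList3 (a b c : String) :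
    (PySem.Dict.ofList [("region", a), ("address", b), ("name", c)]).items
      = [("region", a), ("address", b), ("name", c)] := by
  simp [PySem.Dict.ofList, PySem.Dict.update, PySem.Dict.insert, PySem.Dict.contains,
    PySem.Dict.empty]

-- ===== VERDICT (by name: the statement is the Claim_ definition above) =====
theorem getNameAndAddress_spec : Claim_equal_getNameAndAddress := by
  intro ls _
  show getNameAndAddress ls = getNameAndAddress_alt ls
  unfold getNameAndAddress getNameAndAddress_alt
  simp only [fold_eq_altGo]
  obtain ⟨a, b, c, hshape⟩ := pvAltGo_shape ls ls.length
  rw [hshape, items_ofList3]
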